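-- pv_equiv track=rewrite | github.com/vidyabharti9/Software-Project | Backend/Backend/Web_Analyzer/content_style_grading.py | evaluate_visual_harmony
-- ===== SOURCE A (Python) =====
-- serif_fonts = ['Times New Roman', 'Georgia', 'Garamond', 'Palatino', 'Book Antiqua']
--
-- sans_serif_fonts = ['Arial', 'Helvetica', 'Verdana', 'Tahoma', 'Trebuchet MS']
--
-- def evaluate_visual_harmony(font_families):
--     serif_count = sum(1 for font in font_families if any(serif in font for serif in serif_fonts))
--     sans_serif_count = sum(1 for font in font_families if any(sans_serif in font for sans_serif in sans_serif_fonts))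
--
--     # Check for typeface consistency
--     typeface_counts = {}
--     for font in font_families:
--         base_font = font.split(',')[0].strip()  # Get the base typeface name
--         if base_font in typeface_counts:
--             typeface_counts[base_font] += 1
--         else:
--             typeface_counts[base_font] = 1
--
--     # Calculate harmony score
--     harmony_score = min(serif_count, sans_serif_count) + sum(1 for count in typeface_counts.values() if count > 1)
--     return harmony_score
-- ===== SOURCE B (Python) =====
-- serif_fonts = ['Times New Roman', 'Georgia', 'Garamond', 'Palatino', 'Book Antiqua']
--
-- sans_serif_fonts = ['Arial', 'Helvetica', 'Verdana', 'Tahoma', 'Trebuchet MS']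
--
-- def evaluate_visual_harmony(font_families):
--     bases = [f.split(',')[0].strip() for f in font_families]
--     serif_count = len([f for f in font_families if any(s in f for s in serif_fonts)])
--     sans_serif_count = len([f for f in font_families if any(s in f for s in sans_serif_fonts)])
--     # a base typeface is repeated iff some index is its SECOND occurrence: no counting dict needed
--     repeated = sum(1 for i, b in enumerate(bases) if bases[:i].count(b) == 1)
--     return min(serif_count, sans_serif_count) + repeated
-- ===== Notes on version B (the rewrite author's own statement) =====
-- stated objective: alternative
-- what changed: B eliminates A's typeface-counting dictionary: instead of building a hash counter and counting values > 1, it counts indices that are the SECOND occurrence of their base typeface (prefix bases[:i].count(b) == 1), and computes the serif/sans counts as lengths of filtered lists instead of generator sums.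
import Mathlib
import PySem

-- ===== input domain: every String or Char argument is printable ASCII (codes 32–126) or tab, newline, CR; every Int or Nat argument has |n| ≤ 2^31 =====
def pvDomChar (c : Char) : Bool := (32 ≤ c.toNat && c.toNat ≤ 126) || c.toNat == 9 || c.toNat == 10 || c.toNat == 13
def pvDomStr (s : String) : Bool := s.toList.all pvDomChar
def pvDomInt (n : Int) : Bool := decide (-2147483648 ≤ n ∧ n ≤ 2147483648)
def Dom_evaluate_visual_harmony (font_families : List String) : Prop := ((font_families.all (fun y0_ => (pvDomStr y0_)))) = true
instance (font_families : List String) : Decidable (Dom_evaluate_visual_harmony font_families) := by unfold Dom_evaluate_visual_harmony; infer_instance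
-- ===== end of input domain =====

-- B drops A's counting dictionary entirely: it marks a base typeface as repeated by detecting its
-- SECOND occurrence (an index whose prefix already holds the name exactly once) — a prefix-scan
-- algorithm instead of a hash counter (objective: alternative, same result, no dict).

-- ===== PORT A =====
def serifFonts : List String := ["Times New Roman", "Georgia", "Garamond", "Palatino", "Book Antiqua"]

def sansSerifFonts : List String := ["Arial", "Helvetica", "Verdana", "Tahoma", "Trebuchet MS"]

-- font.split(',')[0].strip(): split on ',' always yields a nonempty list, so [0] is its head
def baseFont (font : String) : String :=
  PySem.Str.strip ((((PySem.Str.split? font ",").getD []).headD ""))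

def evaluate_visual_harmony (font_families : List String) : Int :=
  let serif_count : Int :=
    font_families.foldl (fun acc font =>
      if serifFonts.any (fun s => PySem.Str.isIn s font) then acc + 1 else acc) 0
  let sans_serif_count : Int :=
    font_families.foldl (fun acc font =>
      if sansSerifFonts.any (fun s => PySem.Str.isIn s font) then acc + 1 else acc) 0
  let typeface_counts : PySem.Dict String Int :=
    font_families.foldl (fun d font =>
      let base_font := baseFont font
      if d.contains base_font then d.insert base_font (d.getD base_font 0 + 1)
      else d.insert base_font 1) PySem.Dict.empty
  min serif_count sans_serif_count +
    typeface_counts.values.foldl (fun acc c => if c > 1 then acc + 1 else acc) 0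

-- ===== PORT B =====
def evaluate_visual_harmony_alt (font_families : List String) : Int :=
  let bases := font_families.map baseFont
  let serif_count : Int :=
    ((font_families.filter (fun f => serifFonts.any (fun s => PySem.Str.isIn s f))).length : Int)
  let sans_serif_count : Int :=
    ((font_families.filter (fun f => sansSerifFonts.any (fun s => PySem.Str.isIn s f))).length : Int)
  -- sum(1 for i, b in enumerate(bases) if bases[:i].count(b) == 1)
  let repeated : Int :=
    (PySem.List.enumerate bases).foldl (fun acc p =>
      if PySem.List.count (PySem.List.slice bases none (some p.1)) p.2 == 1 then acc + 1 else acc) 0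
  min serif_count sans_serif_count + repeated

-- ===== PRECONDITION & SPEC =====
def Spec_evaluate_visual_harmony (font_families : List String) (out : Int) : Prop := out = evaluate_visual_harmony_alt font_families
instance (font_families : List String) (out : Int) : Decidable (Spec_evaluate_visual_harmony font_families out) := by unfold Spec_evaluate_visual_harmony; infer_instance

-- ===== CLAIM (what is proved, stated in full; the proofs are below) =====
def Claim_equal_evaluate_visual_harmony : Prop := ∀ (font_families : List String), Dom_evaluate_visual_harmony font_families → Spec_evaluate_visual_harmony font_families (evaluate_visual_harmony font_families)

-- ===== LEMMAS AND PROOFS =====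

-- A's branchy dict step equals the unconditional counter step
theorem dict_step_eq (d : PySem.Dict String Int) (base : String) :
    (if d.contains base then d.insert base (d.getD base 0 + 1) else d.insert base 1)
      = d.insert base (d.getD base 0 + 1) := by
  by_cases h : d.contains base = true
  · simp [h]
  · have h' : d.contains base = false := by simpa using h
    rw [if_neg (by simp [h']), PySem.Dict.getD_of_not_contains d 0 h']
    norm_num

theorem countP_nodup_update {α : Type} [DecidableEq α] (l : List α) (x : α) (p q : α → Bool)
    (hl : l.Nodup) (h : ∀ k ∈ l, k ≠ x → q k = p k) :
    ((l.countP q : Int)) =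
      (l.countP p : Int) + (if x ∈ l then ((if q x then (1:Int) else 0) - (if p x then 1 else 0)) else 0) := by
  induction l with
  | nil => simp
  | cons a t ih =>
    rcases List.nodup_cons.mp hl with ⟨hat, hnt⟩
    have iht := ih hnt (fun k hk hkx => h k (List.mem_cons_of_mem _ hk) hkx)
    by_cases hax : a = x
    · have hxnt : x ∉ t := hax ▸ hat
      have ht : t.countP q = t.countP p :=
        List.countP_congr (fun k hk => by
          have := h k (List.mem_cons_of_mem _ hk) (fun e => hxnt (e ▸ hk))
          simp [this])
      simp only [List.countP_cons, ht, hax, List.mem_cons, hxnt, or_false]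
      by_cases hq : q x <;> by_cases hp : p x <;> simp [hq, hp]
    · have hq : q a = p a := h a List.mem_cons_self hax
      by_cases hx : x ∈ t
      · simp only [List.countP_cons, hq, List.mem_cons, hx, or_true, if_pos] at iht ⊢
        by_cases hp : p a <;> simp only [hp, if_pos, if_neg, Bool.false_eq_true, not_false_iff] <;>
          push_cast at iht ⊢ <;> omega
      · have hxl : x ∉ a :: t := by simp [hx, Ne.symm hax]
        simp only [List.countP_cons, hq, hxl] at iht ⊢
        by_cases hp : p a <;> simp [hp, iht] <;> exact fun hc => absurd hc hx

theorem count_append_singleton (bs : List String) (x k : String) :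
    List.count k (bs ++ [x]) = List.count k bs + (if k = x then 1 else 0) := by
  rcases eq_or_ne k x with h | h
  · subst h; simp [List.count_append]
  · simp [List.count_append, h.symm, h]

theorem dup_core (bs : List String) :
    (((PySem.Set.ofList bs).countP (fun k => decide (1 < List.count k bs)) : Int)) =
      (((List.range bs.length).countP (fun j => List.count (bs.getD j "") (bs.take j) == 1) : Int)) := by
  induction bs using List.reverseRecOn with
  | nil => simp
  | append_singleton bs x ih =>
    have hset : PySem.Set.ofList (bs ++ [x]) = PySem.Set.add (PySem.Set.ofList bs) x := by
      rw [PySem.Set.ofList_eq_foldl, PySem.Set.ofList_eq_foldl, List.foldl_append]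
      rfl
    -- RHS step
    have hrange : List.range ((bs ++ [x]).length) = List.range bs.length ++ [bs.length] := by
      simp [List.range_succ]
    have hget : (bs ++ [x])[bs.length]? = some x := by
      rw [List.getElem?_append_right (le_refl _)]
      simp
    have htakelast : (bs ++ [x]).take bs.length = bs := by simp
    have hrhs_pref : (List.range bs.length).countP
          (fun j => List.count ((bs ++ [x]).getD j "") ((bs ++ [x]).take j) == 1)
        = (List.range bs.length).countP (fun j => List.count (bs.getD j "") (bs.take j) == 1) := by
      refine List.countP_congr (fun j hj => ?_)
      have hjlt : j < bs.length := List.mem_range.mp hj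
      have h1 : (bs ++ [x])[j]? = bs[j]? := List.getElem?_append_left hjlt
      have h2 : (bs ++ [x]).take j = bs.take j := List.take_append_of_le_length (le_of_lt hjlt)
      simp [List.getD, h1, h2]
    have hrhs : (((List.range ((bs ++ [x]).length)).countP
          (fun j => List.count ((bs ++ [x]).getD j "") ((bs ++ [x]).take j) == 1) : Nat))
        = ((List.range bs.length).countP (fun j => List.count (bs.getD j "") (bs.take j) == 1))
            + (if List.count x bs = 1 then 1 else 0) := by
      rw [hrange, List.countP_append, hrhs_pref]
      simp only [List.countP_cons, List.countP_nil, List.getD, hget, Option.getD_some, htakelast]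
      split_ifs with h1 h2 h2 <;> simp_all
    rw [hrhs, hset]
    by_cases hx : x ∈ bs
    · have hxs : x ∈ PySem.Set.ofList bs := (PySem.Set.mem_ofList bs x).mpr hx
      have hadd : PySem.Set.add (PySem.Set.ofList bs) x = PySem.Set.ofList bs := by
        simp [PySem.Set.add, hxs]
      rw [hadd]
      have hupd := countP_nodup_update (PySem.Set.ofList bs) x
          (fun k => decide (1 < List.count k bs))
          (fun k => decide (1 < List.count k (bs ++ [x])))
          (PySem.Set.nodup_ofList bs)
          (fun k _ hkx => by simp [count_append_singleton bs x k, hkx])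
      rw [hupd, ih]
      have hc1 : 1 ≤ List.count x bs := List.one_le_count_iff.mpr hx
      have hcx : List.count x (bs ++ [x]) = List.count x bs + 1 := by
        simp [count_append_singleton bs x x]
      push_cast
      simp only [hxs, if_pos, hcx]
      by_cases h1 : List.count x bs = 1
      · simp [h1]
      · have h2 : 1 < List.count x bs := by omega
        simp [h1, h2, Nat.lt_add_right 1 h2]
    · have hxs : x ∉ PySem.Set.ofList bs := fun hc => hx ((PySem.Set.mem_ofList bs x).mp hc)
      have hadd : PySem.Set.add (PySem.Set.ofList bs) x = PySem.Set.ofList bs ++ [x] := by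
        simp [PySem.Set.add, hxs]
      have hcx0 : List.count x bs = 0 := List.count_eq_zero.mpr hx
      have hcx : List.count x (bs ++ [x]) = 1 := by
        simp [count_append_singleton bs x x, hcx0]
      have hpref : (PySem.Set.ofList bs).countP (fun k => decide (1 < List.count k (bs ++ [x])))
          = (PySem.Set.ofList bs).countP (fun k => decide (1 < List.count k bs)) := by
        refine List.countP_congr (fun k hk => ?_)
        have hkx : k ≠ x := fun e => hxs (e ▸ hk)
        simp [count_append_singleton bs x k, hkx]
      have hone : List.countP (fun k => decide (1 < List.count k (bs ++ [x]))) [x] = 0 := by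
        simp only [List.countP_cons, List.countP_nil, hcx]
        simp
      rw [hadd, List.countP_append, hpref, hone, Nat.add_zero, ih]
      simp [hcx0]


theorem a_dup_eq (bs : List String) :
    (PySem.Dict.counter bs).values.foldl (fun acc c => if c > 1 then acc + 1 else acc) 0
      = (((PySem.Set.ofList bs).countP (fun k => decide (1 < List.count k bs)) : Int)) := by
  rw [PySem.List.foldl_ite_add_one (fun c => 1 < c)]
  have hv : (PySem.Dict.counter bs).values
      = (PySem.Set.ofList bs).map (fun k => ((List.count k bs : Int))) := by
    show (PySem.Dict.counter bs).items.map (·.2) = _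
    rw [PySem.Dict.items_counter]
    simp
  rw [hv, List.countP_map]
  norm_num [Function.comp_def]

theorem b_dup_eq (bs : List String) :
    (PySem.List.enumerate bs).foldl (fun acc p =>
        if PySem.List.count (PySem.List.slice bs none (some p.1)) p.2 == 1 then acc + 1 else acc) 0
      = (((List.range bs.length).countP (fun j => List.count (bs.getD j "") (bs.take j) == 1) : Int)) := by
  rw [show (fun (acc : Int) (p : Int × String) =>
        if PySem.List.count (PySem.List.slice bs none (some p.1)) p.2 == 1 then acc + 1 else acc)
      = (fun acc p =>
        if (fun (q : Int × String) => PySem.List.count (PySem.List.slice bs none (some q.1)) q.2 == 1) p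
          then acc + 1 else acc) from rfl,
    PySem.List.foldl_if_add_one]
  rw [PySem.List.enumerate_eq_map_pyRange bs "", List.countP_map]
  rw [PySem.List.pyRange_one, List.countP_map]
  norm_num [Function.comp_def]

-- a conditional-count foldl equals the length of the corresponding filter
theorem serif_fold_eq (l : List String) (p : String → Bool) :
    l.foldl (fun acc f => if p f then acc + 1 else acc) (0 : Int) = ((l.filter p).length : Int) := by
  rw [PySem.List.foldl_if_add_one p, List.countP_eq_length_filter]
  simp

-- ===== VERDICT (by name: the statement is the Claim_ definition above) =====
theorem evaluate_visual_harmony_spec : Claim_equal_evaluate_visual_harmony := by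
  intro fs _
  unfold Spec_evaluate_visual_harmony evaluate_visual_harmony evaluate_visual_harmony_alt
  dsimp only
  rw [serif_fold_eq, serif_fold_eq]
  have hdict : fs.foldl (fun d font =>
      let base_font := baseFont font
      if d.contains base_font then d.insert base_font (d.getD base_font 0 + 1)
      else d.insert base_font 1) PySem.Dict.empty
      = PySem.Dict.counter (fs.map baseFont) := by
    rw [← PySem.Dict.foldl_insert_getD_add_one_eq_counter, List.foldl_map]
    exact PySem.List.foldl_congr_mem fs _ _ PySem.Dict.empty
      (fun d font _ => dict_step_eq d (baseFont font))
  rw [hdict, a_dup_eq, dup_core, ← b_dup_eq]
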